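-- pv_equiv track=rewrite | github.com/andebetpython/astuProject1 | DSA.py | combining_anagrams_index
-- ===== SOURCE A (Python) =====
-- def combining_anagrams_index(list1):
--     d={}
--     for i in range(len(list1)):
--         word="".join(sorted(list1[i]))
--         if word not in d:
--             d[word]=[i]
--         else:
--             d[word].append(i)
--     return d
-- ===== SOURCE B (Python) =====
-- def combining_anagrams_index(list1):
--     keys = ["".join(sorted(w)) for w in list1]
--     return {k: [i for i, kk in enumerate(keys) if kk == k] for k in dict.fromkeys(keys)}
-- ===== Notes on version B (the rewrite author's own statement) =====
-- stated objective: simpler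
-- what changed: Replaces the index loop that mutates a dict (insert-or-append per element) with a declarative two-comprehension version: compute all anagram keys once, dedup them in first-occurrence order with dict.fromkeys, and build each group by scanning the key list for matching indices.
import Mathlib
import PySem

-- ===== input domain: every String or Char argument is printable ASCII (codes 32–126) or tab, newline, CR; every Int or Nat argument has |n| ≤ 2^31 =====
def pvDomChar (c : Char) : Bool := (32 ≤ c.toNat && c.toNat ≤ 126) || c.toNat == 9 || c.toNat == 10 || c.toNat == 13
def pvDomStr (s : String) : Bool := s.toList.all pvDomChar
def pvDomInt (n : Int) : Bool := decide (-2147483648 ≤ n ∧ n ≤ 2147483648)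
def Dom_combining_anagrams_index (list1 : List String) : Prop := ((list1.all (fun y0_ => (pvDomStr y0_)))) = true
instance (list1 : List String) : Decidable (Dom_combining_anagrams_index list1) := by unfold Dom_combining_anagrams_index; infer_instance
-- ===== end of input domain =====

-- B replaces A's index loop that mutates a dict (insert-or-append per element) by a declarative
-- dedup-keys + per-key index scan; objective: simpler (not faster).

-- ''.join(sorted(word)) — shared by both Pythons verbatim
def pvAnagramKey (w : String) : String :=
  PySem.Str.join "" ((PySem.List.sorted w.toList (fun c => c)).map (fun c => String.ofList [c]))

-- ===== PORT A =====
def combining_anagrams_index (list1 : List String) : List (String × List Int) :=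
  (List.foldl (fun (d : PySem.Dict String (List Int)) (p : Int × String) =>
      let word := pvAnagramKey p.2
      if d.contains word = false then d.insert word [p.1]
      else d.modify word [] (fun v => v ++ [p.1]))
    PySem.Dict.empty (PySem.List.enumerate list1 0)).items

-- ===== PORT B =====
def combining_anagrams_index_alt (list1 : List String) : List (String × List Int) :=
  let keys := list1.map pvAnagramKey
  (PySem.List.dedup keys).map (fun k =>
    (k, ((PySem.List.enumerate keys 0).filter (fun p => p.2 == k)).map (fun p => p.1)))

-- ===== PRECONDITION & SPEC =====
def Spec_combining_anagrams_index (list1 : List String) (out : List (String × List Int)) : Prop := out = combining_anagrams_index_alt list1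
instance (list1 : List String) (out : List (String × List Int)) : Decidable (Spec_combining_anagrams_index list1 out) := by unfold Spec_combining_anagrams_index; infer_instance

-- ===== CLAIM (what is proved, stated in full; the proofs are below) =====
def Claim_equal_combining_anagrams_index : Prop := ∀ (list1 : List String), Dom_combining_anagrams_index list1 → Spec_combining_anagrams_index list1 (combining_anagrams_index list1)

-- ===== LEMMAS AND PROOFS =====

theorem pv_enum_map {α β : Type} (f : α → β) (l : List α) (s : Int) :
    PySem.List.enumerate (l.map f) s = (PySem.List.enumerate l s).map (fun p => (p.1, f p.2)) := by
  induction l generalizing s with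
  | nil => simp [PySem.List.enumerate]
  | cons x t ih => simp [PySem.List.enumerate, ih]

theorem pv_bodyA_eq (d : PySem.Dict String (List Int)) (p : Int × String) :
    (let word := pvAnagramKey p.2
     if d.contains word = false then d.insert word [p.1]
     else d.modify word [] (fun v => v ++ [p.1]))
    = d.modify (pvAnagramKey p.2) [] (fun v => v ++ [p.1]) := by
  by_cases h : d.contains (pvAnagramKey p.2) = true
  · simp [h]
  · simp only [Bool.not_eq_true] at h
    simp [h, PySem.Dict.modify, PySem.Dict.getD_of_not_contains d [] h]

theorem combining_anagrams_index_eq_alt (list1 : List String) :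
    combining_anagrams_index list1 = combining_anagrams_index_alt list1 := by
  unfold combining_anagrams_index combining_anagrams_index_alt
  rw [funext (fun d => funext (fun p => pv_bodyA_eq d p))]
  set l := PySem.List.enumerate list1 0 with hl
  set D := List.foldl (fun (d : PySem.Dict String (List Int)) (p : Int × String) =>
      d.modify (pvAnagramKey p.2) [] (fun v => v ++ [p.1])) PySem.Dict.empty l with hD
  have hkeys : D.keys = PySem.List.dedup (list1.map pvAnagramKey) := by
    rw [hD, PySem.Dict.keys_foldl_modify_key l (fun p => pvAnagramKey p.2) [] (fun _ p => (fun v => v ++ [p.1]))]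
    have : l.map (fun p => pvAnagramKey p.2) = list1.map pvAnagramKey := by
      conv_rhs => rw [← PySem.List.map_snd_enumerate list1 0]
      rw [hl, List.map_map]; rfl
    rw [this]; rfl
  have hnd : D.keys.Nodup := by
    rw [hD]
    exact PySem.Dict.nodup_keys_foldl_modify_key l (fun p => pvAnagramKey p.2) []
      (fun _ p => (fun v => v ++ [p.1])) PySem.Dict.empty (by simp [PySem.Dict.empty, PySem.Dict.keys])
  have hgetD : ∀ k, D.getD k [] =
      ((PySem.List.enumerate (list1.map pvAnagramKey) 0).filter (fun p => p.2 == k)).map (fun p => p.1) := by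
    intro k
    have hfold : D = List.foldl (fun (d : PySem.Dict String (List Int)) (q : String × Int) =>
        d.modify q.1 [] (fun v => v ++ [q.2])) PySem.Dict.empty
        (l.map (fun p => (pvAnagramKey p.2, p.1))) := by
      rw [hD, List.foldl_map]
    rw [hfold, PySem.Dict.getD_foldl_modify_append]
    rw [pv_enum_map pvAnagramKey list1 0, ← hl]
    simp [List.filter_map, List.map_map, Function.comp_def]
  rw [PySem.Dict.items_eq_map_keys D hnd [], hkeys]
  exact List.map_congr_left (fun k _ => by rw [hgetD k])

-- ===== VERDICT (by name: the statement is the Claim_ definition above) =====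
theorem combining_anagrams_index_spec : Claim_equal_combining_anagrams_index := by
  intro list1 _
  unfold Spec_combining_anagrams_index
  exact combining_anagrams_index_eq_alt list1
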